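-- pv_equiv track=rewrite | github.com/errogtr/advent-of-code | src/aoc/2016/day24/solution.py | build_marked_pts_graph
-- ===== SOURCE A (Python) =====
-- from collections import defaultdict
-- from heapq import heappop, heappush
-- from itertools import product
--
-- Coord = tuple[int, int]
--
-- MarkedPtLinks = dict[str, int]
--
-- def nearest_neighbors(x: int, y: int) -> list[Coord]:
--     return [(x + vx, y + vy) for vx, vy in [(1, 0), (0, 1), (-1, 0), (0, -1)]]
--
-- def build_marked_pts_graph(
--     marked_pts: dict[str, Coord], walls: set[Coord]
-- ) -> dict[str, MarkedPtLinks]: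
--     marked_pts_graph: dict[str, MarkedPtLinks] = defaultdict(dict)
--     for (start, start_pt), (end, end_pt) in product(marked_pts.items(), repeat=2):
--         if start == end:
--             continue
--
--         queue = [(0, start_pt)]
--         visited = {start_pt}
--         while queue:
--             curr_dist, curr_pt = heappop(queue)
--
--             if curr_pt == end_pt:
--                 marked_pts_graph[start][end] = curr_dist
--                 break
--
--             for next_pt in nearest_neighbors(*curr_pt):
--                 if next_pt not in visited and next_pt not in walls:
--                     heappush(queue, (curr_dist + 1, next_pt))
--                     visited.add(next_pt)
--
--     return marked_pts_graph
-- ===== SOURCE B (Python) =====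
-- from heapq import heappop, heappush
--
--
-- def nearest_neighbors(x, y):
--     return [(x + vx, y + vy) for vx, vy in [(1, 0), (0, 1), (-1, 0), (0, -1)]]
--
--
-- def build_marked_pts_graph(marked_pts, walls):
--     # One multi-target search per start (instead of one search per ordered pair):
--     # a single Dijkstra/BFS sweep from each start records the distance to every
--     # other marked point the first time its cell is popped.
--     items = list(marked_pts.items())
--     graph = {}
--     for start, start_pt in items:
--         remaining = {pt for name, pt in items if name != start}
--         dist = {}
--         queue = [(0, start_pt)]
--         visited = {start_pt}
--         while queue and remaining:
--             d, pt = heappop(queue)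
--             if pt in remaining:
--                 dist[pt] = d
--                 remaining.discard(pt)
--             for next_pt in nearest_neighbors(*pt):
--                 if next_pt not in visited and next_pt not in walls:
--                     heappush(queue, (d + 1, next_pt))
--                     visited.add(next_pt)
--         links = {
--             end: dist[end_pt]
--             for end, end_pt in items
--             if end != start and end_pt in dist
--         }
--         if links:
--             graph[start] = links
--     return graph
-- ===== Notes on version B (the rewrite author's own statement) =====
-- stated objective: alternative
-- what changed: A runs one heap search per ORDERED PAIR of marked points; B runs a single multi-target heap search per start that records the distance to every other marked point as it is popped, so M searches replace M*(M-1).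
import Mathlib
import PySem

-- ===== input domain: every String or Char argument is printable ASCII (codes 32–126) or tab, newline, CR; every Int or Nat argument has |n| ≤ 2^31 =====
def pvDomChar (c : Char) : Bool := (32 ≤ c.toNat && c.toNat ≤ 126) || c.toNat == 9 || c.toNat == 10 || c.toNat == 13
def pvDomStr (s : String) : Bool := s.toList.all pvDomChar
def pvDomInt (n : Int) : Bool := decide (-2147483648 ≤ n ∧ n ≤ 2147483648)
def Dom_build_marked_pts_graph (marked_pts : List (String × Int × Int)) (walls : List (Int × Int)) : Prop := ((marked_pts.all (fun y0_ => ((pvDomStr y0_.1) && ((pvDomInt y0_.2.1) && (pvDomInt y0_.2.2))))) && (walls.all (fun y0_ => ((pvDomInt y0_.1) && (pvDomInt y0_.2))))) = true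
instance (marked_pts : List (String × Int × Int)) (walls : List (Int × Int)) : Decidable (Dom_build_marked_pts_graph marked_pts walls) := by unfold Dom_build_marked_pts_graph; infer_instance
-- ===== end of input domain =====

-- B replaces A's one heap search PER ORDERED PAIR of marked points by ONE multi-target
-- heap search per start that records every other marked point as it is popped
-- (M searches instead of M*(M-1); a timing run could not measure this item).

-- ===== PORT A =====

-- module helper 'nearest_neighbors' (shared by both Python versions)
def nearest_neighbors (x y : Int) : List (Int × Int) :=
  [((1 : Int), (0 : Int)), (0, 1), (-1, 0), (0, -1)].map (fun v => (x + v.1, y + v.2))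

-- exact model of the heapq usage in both versions: only the POPPED values of the heap
-- are ever observed, and heappop returns the minimum element (Python's lexicographic
-- order on (dist, (x, y)) tuples), so the heap is modelled by its list of elements:
-- push appends, pop removes and returns the minimum element.
def pvLt (a b : Int × Int × Int) : Bool :=
  a.1 < b.1 || (a.1 == b.1 && (a.2.1 < b.2.1 || (a.2.1 == b.2.1 && a.2.2 < b.2.2)))

def heapPop? (q : List (Int × Int × Int)) :
    Option ((Int × Int × Int) × List (Int × Int × Int)) :=
  match q with
  | [] => none
  | x :: xs =>
    let m := xs.foldl (fun a b => if pvLt b a then b else a) x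
    some (m, (x :: xs).erase m)

-- the inner 'for next_pt in nearest_neighbors(*curr_pt)' loop, identical lines in
-- both Python versions: push unvisited non-wall neighbours, marking them visited.
-- 'visited' is a Python set used ONLY for add/membership, modelled exactly by a hash set
def pushNbrs (walls : List (Int × Int)) (d : Int) (pt : Int × Int)
    (q : List (Int × Int × Int)) (v : Std.HashSet (Int × Int)) :
    List (Int × Int × Int) × Std.HashSet (Int × Int) :=
  (nearest_neighbors pt.1 pt.2).foldl
    (fun s np =>
      if !(s.2.contains np) && !(walls.contains np) then
        (s.1 ++ [(d + 1, np.1, np.2)], s.2.insert np)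
      else s)
    (q, v)

-- fuel bound on heap pops: A's 'while queue' loop is unbounded (it diverges when some
-- marked point is unreachable in an infinite free region); the cap makes the port total
def pvFuel : Nat := 2 ^ 64

-- A's per-pair search: pop until end_pt is popped (its distance) or the queue is empty
def bfsA (walls : List (Int × Int)) (endPt : Int × Int) :
    Nat → List (Int × Int × Int) → Std.HashSet (Int × Int) → Option Int
  | 0, _, _ => none
  | fuel + 1, q, v =>
    match heapPop? q with
    | none => none
    | some ((d, px, py), rest) =>
      if (px, py) = endPt then some d
      else
        let s := pushNbrs walls d (px, py) rest v
        bfsA walls endPt fuel s.1 s.2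

def build_marked_pts_graph (marked_pts : List (String × Int × Int)) (walls : List (Int × Int)) : List (String × List (String × Int)) :=
  ((marked_pts.foldl
      (fun (g : PySem.Dict String (PySem.Dict String Int)) sp =>
        marked_pts.foldl
          (fun (g : PySem.Dict String (PySem.Dict String Int)) ep =>
            if sp.1 == ep.1 then g
            else
              match bfsA walls (ep.2.1, ep.2.2) pvFuel
                  [(0, sp.2.1, sp.2.2)] (Std.HashSet.ofList [sp.2]) with
              | none => g
              | some d => g.insert sp.1 ((g.getD sp.1 PySem.Dict.empty).insert ep.1 d))
          g)
      PySem.Dict.empty).items).map (fun p => (p.1, p.2.items))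

-- ===== PORT B =====

-- B's single multi-target search from one start: pop while the queue is nonempty and
-- some target remains, recording each target's distance the first time it is popped
def bfsB (walls : List (Int × Int)) :
    Nat → List (Int × Int × Int) → Std.HashSet (Int × Int) →
    PySem.Dict (Int × Int) Int → PySem.Set (Int × Int) → PySem.Dict (Int × Int) Int
  | 0, _, _, dist, _ => dist
  | fuel + 1, q, v, dist, remaining =>
    match remaining with
    | [] => dist
    | _ :: _ =>
      match heapPop? q with
      | none => dist
      | some ((d, px, py), rest) =>
        let dr :=
          if PySem.Set.contains remaining (px, py) then
            (dist.insert (px, py) d, PySem.Set.discard remaining (px, py))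
          else (dist, remaining)
        let s := pushNbrs walls d (px, py) rest v
        bfsB walls fuel s.1 s.2 dr.1 dr.2

def build_marked_pts_graph_alt (marked_pts : List (String × Int × Int)) (walls : List (Int × Int)) : List (String × List (String × Int)) :=
  ((marked_pts.foldl
      (fun (g : PySem.Dict String (PySem.Dict String Int)) sp =>
        let remaining : PySem.Set (Int × Int) :=
          PySem.Set.ofList
            ((marked_pts.filter (fun ep => ep.1 != sp.1)).map (fun ep => (ep.2.1, ep.2.2)))
        let dist :=
          bfsB walls pvFuel [(0, sp.2.1, sp.2.2)] (Std.HashSet.ofList [sp.2])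
            PySem.Dict.empty remaining
        let links :=
          marked_pts.foldl
            (fun (l : PySem.Dict String Int) ep =>
              if ep.1 != sp.1 then
                match dist.get? (ep.2.1, ep.2.2) with
                | some d => l.insert ep.1 d
                | none => l
              else l)
            PySem.Dict.empty
        if links.items.isEmpty then g else g.insert sp.1 links)
      PySem.Dict.empty).items).map (fun p => (p.1, p.2.items))

-- ===== PRECONDITION & SPEC =====
-- Pre_ excludes only assoc lists with DUPLICATE marked-point names: a Python dict cannot
-- carry two entries with the same key, so such lists encode no dict input of A at all.
def Pre_build_marked_pts_graph (marked_pts : List (String × Int × Int)) (_walls : List (Int × Int)) : Prop :=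
  (marked_pts.map (·.1)).Nodup
instance (marked_pts : List (String × Int × Int)) (walls : List (Int × Int)) : Decidable (Pre_build_marked_pts_graph marked_pts walls) := by unfold Pre_build_marked_pts_graph; infer_instance

def pvWitness_build_marked_pts_graph : (List (String × Int × Int)) × (List (Int × Int)) :=
  ([("0", 0, 0), ("1", 2, 0)], [(1, 0)])

def Spec_build_marked_pts_graph (marked_pts : List (String × Int × Int)) (walls : List (Int × Int)) (out : List (String × List (String × Int))) : Prop := out = build_marked_pts_graph_alt marked_pts walls
instance (marked_pts : List (String × Int × Int)) (walls : List (Int × Int)) (out : List (String × List (String × Int))) : Decidable (Spec_build_marked_pts_graph marked_pts walls out) := by unfold Spec_build_marked_pts_graph; infer_instance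

-- ===== CLAIM (what is proved, stated in full; the proofs are below) =====
def Claim_equal_build_marked_pts_graph : Prop := ∀ (marked_pts : List (String × Int × Int)) (walls : List (Int × Int)), Dom_build_marked_pts_graph marked_pts walls → Pre_build_marked_pts_graph marked_pts walls → Spec_build_marked_pts_graph marked_pts walls (build_marked_pts_graph marked_pts walls)

-- ===== LEMMAS AND PROOFS =====

-- B never touches a distance already recorded for a point no longer remaining
theorem bfsB_persist (walls : List (Int × Int)) (e : Int × Int) (d0 : Int) :
    ∀ (fuel : Nat) (q : List (Int × Int × Int)) (v : Std.HashSet (Int × Int))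
      (dist : PySem.Dict (Int × Int) Int) (rem : PySem.Set (Int × Int)),
      dist.get? e = some d0 → e ∉ rem →
      (bfsB walls fuel q v dist rem).get? e = some d0 := by
  intro fuel
  induction fuel with
  | zero => intro q v dist rem h _; simpa [bfsB] using h
  | succ n ih =>
    intro q v dist rem h he
    unfold bfsB
    cases rem with
    | nil => simpa using h
    | cons r rs =>
      cases hp : heapPop? q with
      | none => exact h
      | some pr =>
        obtain ⟨⟨d, px, py⟩, rest⟩ := pr
        dsimp only
        by_cases hc : PySem.Set.contains (r :: rs) (px, py) = true
        · have hep : e ≠ (px, py) := by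
            intro hh
            exact he (hh ▸ (PySem.Set.contains_iff _ _).1 hc)
          simp only [hc, if_pos]
          exact ih _ _ _ _ (by rw [PySem.Dict.get?_insert_of_ne _ _ hep]; exact h)
            (by intro hm; exact he ((PySem.Set.mem_discard _ _ _).1 hm).1)
        · simp only [hc, if_neg, Bool.false_eq_true, not_false_iff]
          exact ih _ _ _ _ h he

-- KEY: while e is still remaining, B's recorded distance for e is exactly what A's
-- per-pair search (same queue, same visited) returns for target e
theorem bfsB_eq_bfsA (walls : List (Int × Int)) (e : Int × Int) :
    ∀ (fuel : Nat) (q : List (Int × Int × Int)) (v : Std.HashSet (Int × Int))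
      (dist : PySem.Dict (Int × Int) Int) (rem : PySem.Set (Int × Int)),
      e ∈ rem → dist.get? e = none →
      (bfsB walls fuel q v dist rem).get? e = bfsA walls e fuel q v := by
  intro fuel
  induction fuel with
  | zero => intro q v dist rem _ h; simpa [bfsB, bfsA] using h
  | succ n ih =>
    intro q v dist rem hem h
    unfold bfsB bfsA
    cases rem with
    | nil => cases hem
    | cons r rs =>
      cases hp : heapPop? q with
      | none => exact h
      | some pr =>
        obtain ⟨⟨d, px, py⟩, rest⟩ := pr
        dsimp only
        by_cases hpe : (px, py) = e
        · subst hpe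
          have hc : PySem.Set.contains (r :: rs) (px, py) = true :=
            (PySem.Set.contains_iff _ _).2 hem
          rw [if_pos rfl, if_pos hc]
          exact bfsB_persist walls (px, py) d n _ _ _ _
            (PySem.Dict.get?_insert_self _ _ _)
            (by intro hm; exact ((PySem.Set.mem_discard _ _ _).1 hm).2 rfl)
        · rw [if_neg hpe]
          by_cases hc : PySem.Set.contains (r :: rs) (px, py) = true
          · rw [if_pos hc]
            exact ih _ _ _ _
              ((PySem.Set.mem_discard _ _ _).2 ⟨hem, fun hh => hpe hh.symm⟩)
              (by rw [PySem.Dict.get?_insert_of_ne _ _ (fun hh => hpe hh.symm)]; exact h)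
          · rw [if_neg hc]
            exact ih _ _ _ _ hem h

theorem map_eq_self_of_mem {α : Type} (l : List α) (f : α → α) (h : ∀ x ∈ l, f x = x) :
    l.map f = l := by
  induction l with
  | nil => rfl
  | cons a t ih => simp [h a (by simp), ih (fun x hx => h x (by simp [hx]))]

-- overwriting a key twice keeps only the second value
theorem dict_insert_insert {κ ν : Type} [BEq κ] [LawfulBEq κ]
    (d : PySem.Dict κ ν) (k : κ) (v w : ν) :
    (d.insert k v).insert k w = d.insert k w := by
  apply PySem.Dict.ext
  by_cases hc : d.contains k = true
  · rw [PySem.Dict.items_insert_of_contains _ _ hc,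
        PySem.Dict.items_insert_of_contains _ _ (by simp [PySem.Dict.contains_insert_self]),
        PySem.Dict.items_insert_of_contains _ _ hc, List.map_map]
    apply List.map_congr_left
    intro p _
    by_cases hk : p.1 == k
    · simp [hk]
    · simp [hk]
  · have hk : ∀ p ∈ d.items, (p.1 == k) = false := by
      intro p hp
      by_contra hne
      have hp1 : p.1 = k :=
        eq_of_beq (a := p.1) (b := k) (by revert hne; cases h : (p.1 == k) <;> simp)
      have hmem : k ∈ d.keys := by
        rw [show d.keys = d.items.map (·.1) from rfl]
        exact hp1 ▸ List.mem_map_of_mem hp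
      exact absurd ((PySem.Dict.contains_iff_mem_keys _ _).2 hmem) hc
    rw [PySem.Dict.items_insert_of_contains _ _ (by simp [PySem.Dict.contains_insert_self]),
        PySem.Dict.items_insert_of_not_contains _ _ ((Bool.not_eq_true _).mp hc),
        PySem.Dict.items_insert_of_not_contains _ _ ((Bool.not_eq_true _).mp hc),
        List.map_append, map_eq_self_of_mem _ _ (fun p hp => by simp [hk p hp])]
    simp

theorem dict_insert_items_ne_empty {κ ν : Type} [BEq κ] [LawfulBEq κ]
    (d : PySem.Dict κ ν) (k : κ) (v : ν) :
    (d.insert k v).items.isEmpty = false := by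
  by_cases hc : d.contains k = true
  · rw [PySem.Dict.items_insert_of_contains _ _ hc]
    have : k ∈ d.keys := (PySem.Dict.contains_iff_mem_keys _ _).1 hc
    have hne : d.items ≠ [] := by
      intro h
      rw [show d.keys = d.items.map (·.1) from rfl, h] at this
      simp at this
    simp [hne]
  · rw [PySem.Dict.items_insert_of_not_contains _ _ ((Bool.not_eq_true _).mp hc)]
    simp

theorem dict_eq_empty_of_isEmpty {κ ν : Type} [BEq κ]
    (d : PySem.Dict κ ν) (h : d.items.isEmpty = true) : d = PySem.Dict.empty := by
  apply PySem.Dict.ext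
  simpa [List.isEmpty_iff] using h

-- A's outer-loop body for one start sp (the per-pair searches over all ends)
def stepA (walls : List (Int × Int)) (sp : String × Int × Int)
    (g : PySem.Dict String (PySem.Dict String Int)) (ep : String × Int × Int) :
    PySem.Dict String (PySem.Dict String Int) :=
  if sp.1 == ep.1 then g
  else
    match bfsA walls (ep.2.1, ep.2.2) pvFuel [(0, sp.2.1, sp.2.2)] (Std.HashSet.ofList [sp.2]) with
    | none => g
    | some d => g.insert sp.1 ((g.getD sp.1 PySem.Dict.empty).insert ep.1 d)

-- the same searches, collected into the inner dict alone
def innerStep (walls : List (Int × Int)) (sp : String × Int × Int)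
    (l : PySem.Dict String Int) (ep : String × Int × Int) : PySem.Dict String Int :=
  if sp.1 == ep.1 then l
  else
    match bfsA walls (ep.2.1, ep.2.2) pvFuel [(0, sp.2.1, sp.2.2)] (Std.HashSet.ofList [sp.2]) with
    | none => l
    | some d => l.insert ep.1 d

def linksOf (walls : List (Int × Int)) (marked : List (String × Int × Int))
    (sp : String × Int × Int) : PySem.Dict String Int :=
  marked.foldl (innerStep walls sp) PySem.Dict.empty

theorem foldA_aux (walls : List (Int × Int)) (sp : String × Int × Int)
    (ends : List (String × Int × Int)) :
    ∀ (g : PySem.Dict String (PySem.Dict String Int)) (cur : PySem.Dict String Int),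
      sp.1 ∉ g.keys →
      ends.foldl (stepA walls sp) (if cur.items.isEmpty then g else g.insert sp.1 cur)
        = (if (ends.foldl (innerStep walls sp) cur).items.isEmpty then g
           else g.insert sp.1 (ends.foldl (innerStep walls sp) cur)) := by
  induction ends with
  | nil => intro g cur _; rfl
  | cons ep t ih =>
    intro g cur hg
    have hstep :
        stepA walls sp (if cur.items.isEmpty then g else g.insert sp.1 cur) ep
          = (if (innerStep walls sp cur ep).items.isEmpty then g
             else g.insert sp.1 (innerStep walls sp cur ep)) := by
      unfold stepA innerStep
      by_cases hname : sp.1 == ep.1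
      · simp [hname]
      · simp only [hname, Bool.false_eq_true, if_false]
        cases hbfs :
            bfsA walls (ep.2.1, ep.2.2) pvFuel [(0, sp.2.1, sp.2.2)] (Std.HashSet.ofList [sp.2]) with
        | none => rfl
        | some d =>
          dsimp only
          by_cases hemp : cur.items.isEmpty = true
          · have hcur : cur = PySem.Dict.empty := dict_eq_empty_of_isEmpty cur hemp
            have hnc : g.contains sp.1 = false := by
              cases h : g.contains sp.1
              · rfl
              · exact absurd ((PySem.Dict.contains_iff_mem_keys _ _).1 h) hg
            rw [if_pos hemp, if_neg (by simp [dict_insert_items_ne_empty]),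
                PySem.Dict.getD_of_not_contains _ _ hnc, hcur]
          · rw [if_neg hemp, if_neg (by simp [dict_insert_items_ne_empty]),
                PySem.Dict.getD_insert_self, dict_insert_insert]
    calc (ep :: t).foldl (stepA walls sp) (if cur.items.isEmpty then g else g.insert sp.1 cur)
        = t.foldl (stepA walls sp)
            (if (innerStep walls sp cur ep).items.isEmpty then g
             else g.insert sp.1 (innerStep walls sp cur ep)) := by rw [List.foldl_cons, hstep]
      _ = _ := by rw [ih g _ hg]; rfl

-- B's recorded distances give, end by end, exactly A's per-pair search results
theorem linksB_eq (walls : List (Int × Int)) (marked : List (String × Int × Int))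
    (sp : String × Int × Int) :
    marked.foldl
      (fun (l : PySem.Dict String Int) ep =>
        if ep.1 != sp.1 then
          match (bfsB walls pvFuel [(0, sp.2.1, sp.2.2)] (Std.HashSet.ofList [sp.2])
              PySem.Dict.empty
              (PySem.Set.ofList
                ((marked.filter (fun ep => ep.1 != sp.1)).map (fun ep => (ep.2.1, ep.2.2))))).get?
              (ep.2.1, ep.2.2) with
          | some d => l.insert ep.1 d
          | none => l
        else l)
      PySem.Dict.empty = linksOf walls marked sp := by
  unfold linksOf
  apply PySem.List.foldl_congr_mem
  intro acc ep hep
  unfold innerStep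
  by_cases hname : sp.1 = ep.1
  · simp [hname]
  · have hbne : (ep.1 != sp.1) = true := by simp [bne]; exact fun h => hname h.symm
    have hbeq : (sp.1 == ep.1) = false := by simp [hname]
    rw [if_pos hbne, if_neg (by simp [hbeq])]
    rw [bfsB_eq_bfsA walls (ep.2.1, ep.2.2) pvFuel _ _ _ _
      ((PySem.Set.mem_ofList _ _).2
        (List.mem_map.2 ⟨ep, List.mem_filter.2 ⟨hep, hbne⟩, rfl⟩))
      (PySem.Dict.get?_empty _)]
    cases bfsA walls (ep.2.1, ep.2.2) pvFuel [(0, sp.2.1, sp.2.2)] (Std.HashSet.ofList [sp.2]) with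
    | none => rfl
    | some d => rfl

theorem foldOuter (walls : List (Int × Int)) (marked : List (String × Int × Int)) :
    ∀ (l : List (String × Int × Int)) (g : PySem.Dict String (PySem.Dict String Int)),
      (l.map (·.1)).Nodup → (∀ x ∈ l, x.1 ∉ g.keys) →
      l.foldl (fun g sp => marked.foldl (stepA walls sp) g) g
        = l.foldl
            (fun g sp =>
              if (linksOf walls marked sp).items.isEmpty then g
              else g.insert sp.1 (linksOf walls marked sp)) g := by
  intro l
  induction l with
  | nil => intro g _ _; rfl
  | cons sp t ih =>
    intro g hnd hks
    have hgsp : sp.1 ∉ g.keys := hks sp (by simp)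
    have hA : marked.foldl (stepA walls sp) g
        = (if (linksOf walls marked sp).items.isEmpty then g
           else g.insert sp.1 (linksOf walls marked sp)) := by
      have := foldA_aux walls sp marked g PySem.Dict.empty hgsp
      simpa [linksOf] using this
    rw [List.foldl_cons, List.foldl_cons, hA]
    apply ih
    · exact (List.nodup_cons.1 hnd).2
    · intro x hx
      by_cases hemp : (linksOf walls marked sp).items.isEmpty = true
      · rw [if_pos hemp]; exact hks x (by simp [hx])
      · rw [if_neg hemp]
        intro hmem
        rcases (PySem.Dict.mem_keys_insert _ _ _ _).1 hmem with h1 | h2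
        · exact (List.nodup_cons.1 hnd).1 (List.mem_map.2 ⟨x, hx, h1⟩)
        · exact hks x (by simp [hx]) h2

-- ===== VERDICT (by name: the statement is the Claim_ definition above) =====
theorem build_marked_pts_graph_spec : Claim_equal_build_marked_pts_graph := by
  intro marked walls _ hpre
  unfold Spec_build_marked_pts_graph build_marked_pts_graph build_marked_pts_graph_alt
  congr 1
  rw [show (fun (g : PySem.Dict String (PySem.Dict String Int)) (sp : String × Int × Int) =>
        marked.foldl
          (fun (g : PySem.Dict String (PySem.Dict String Int)) ep =>
            if sp.1 == ep.1 then g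
            else
              match bfsA walls (ep.2.1, ep.2.2) pvFuel [(0, sp.2.1, sp.2.2)]
                  (Std.HashSet.ofList [sp.2]) with
              | none => g
              | some d => g.insert sp.1 ((g.getD sp.1 PySem.Dict.empty).insert ep.1 d)) g)
      = (fun g sp => marked.foldl (stepA walls sp) g) from rfl]
  rw [foldOuter walls marked marked PySem.Dict.empty hpre
    (by simp [PySem.Dict.keys_empty])]
  congr 1
  exact (PySem.List.foldl_congr_mem _ _ _ _
    (fun acc sp _ => by dsimp only; rw [linksB_eq walls marked sp])).symm
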